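-- pv_equiv track=rewrite | github.com/OptyxStack/rag-knowledge-base-chatbot | app/services/normalizer.py | _sanitize_evidence_families
-- ===== SOURCE A (Python) =====
-- from typing import Any
--
-- _ALLOWED_EVIDENCE_FAMILIES = {
--     "pricing_limits",
--     "policy_terms",
--     "capability_availability",
--     "transactional_link",
--     "troubleshooting_steps",
--     "comparison_analysis",
--     "account_access",
--     "general_info",
-- }
--
-- def _as_str_list(v: Any, limit: int | None = None) -> list[str]:
--     if not v:
--         return []
--     if isinstance(v, list):
--         out = [str(x).strip() for x in v if x is not None and str(x).strip()]
--     else: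
--         out = [str(v).strip()] if str(v).strip() else []
--     if limit is not None:
--         out = out[:limit]
--     # stable de-dup
--     seen: set[str] = set()
--     dedup: list[str] = []
--     for x in out:
--         xl = x.lower()
--         if xl in seen:
--             continue
--         seen.add(xl)
--         dedup.append(x)
--     return dedup
--
-- def _sanitize_evidence_families(v: Any, limit: int | None = None) -> list[str]:
--     families = _as_str_list(v, limit=limit)
--     out: list[str] = []
--     seen: set[str] = set()
--     for family in families:
--         normalized = family.strip().lower()
--         if normalized not in _ALLOWED_EVIDENCE_FAMILIES or normalized in seen:
--             continue
--         seen.add(normalized)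
--         out.append(normalized)
--     return out
-- ===== SOURCE B (Python) =====
-- _ALLOWED_EVIDENCE_FAMILIES = {
--     "pricing_limits",
--     "policy_terms",
--     "capability_availability",
--     "transactional_link",
--     "troubleshooting_steps",
--     "comparison_analysis",
--     "account_access",
--     "general_info",
-- }
--
-- def _sanitize_evidence_families(v, limit=None):
--     if not v:
--         return []
--     items = v if isinstance(v, list) else [v]
--     candidates = [str(x).strip() for x in items if x is not None and str(x).strip()]
--     if limit is not None:
--         candidates = candidates[:limit]
--     out = []
--     seen = set()
--     for s in candidates:
--         n = s.lower()
--         if n in _ALLOWED_EVIDENCE_FAMILIES and n not in seen: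
--             seen.add(n)
--             out.append(n)
--     return out
-- ===== Notes on version B (the rewrite author's own statement) =====
-- stated objective: simpler
-- what changed: Inlines _as_str_list and fuses its stable case-insensitive dedup pass with the allowlist-filter pass into a single loop over one seen set, dropping the intermediate deduped list and the redundant re-strip.
import Mathlib
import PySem

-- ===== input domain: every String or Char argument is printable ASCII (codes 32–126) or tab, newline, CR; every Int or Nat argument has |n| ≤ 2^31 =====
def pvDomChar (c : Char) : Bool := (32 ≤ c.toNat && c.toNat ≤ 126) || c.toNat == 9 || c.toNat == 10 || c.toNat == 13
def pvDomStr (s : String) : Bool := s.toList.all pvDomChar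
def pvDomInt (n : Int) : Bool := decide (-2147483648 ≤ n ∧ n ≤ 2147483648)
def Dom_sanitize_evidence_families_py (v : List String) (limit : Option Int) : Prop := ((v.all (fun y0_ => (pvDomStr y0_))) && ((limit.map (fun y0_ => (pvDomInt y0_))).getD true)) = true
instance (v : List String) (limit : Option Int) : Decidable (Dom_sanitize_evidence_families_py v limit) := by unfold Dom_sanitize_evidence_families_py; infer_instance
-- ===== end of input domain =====

-- B inlines _as_str_list and fuses its case-insensitive dedup pass with the allowlist filter pass
-- into a single loop over one seen set (objective: simpler). Return-value equivalence only; neither mutates.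

-- module constant _ALLOWED_EVIDENCE_FAMILIES (a set; membership-only use)
def pvAllowed : PySem.Set String :=
  PySem.Set.ofList ["pricing_limits", "policy_terms", "capability_availability", "transactional_link",
    "troubleshooting_steps", "comparison_analysis", "account_access", "general_info"]

-- ===== PORT A =====
-- the stable de-dup loop at the end of _as_str_list
def pvDedupLoop : List String → PySem.Set String → List String → List String
  | [], _, dedup => dedup
  | x :: rest, seen, dedup =>
    let xl := PySem.Str.lower x
    if seen.contains xl then pvDedupLoop rest seen dedup
    else pvDedupLoop rest (seen.add xl) (dedup ++ [x])

-- _as_str_list (v is already a list of strings on this domain, so the isinstance branch is the list one)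
def pvAsStrList (v : List String) (limit : Option Int) : List String :=
  if v = [] then []
  else
    let out := v.filterMap (fun x => let t := PySem.Str.strip x; if t = "" then none else some t)
    let out' := match limit with
      | some l => PySem.List.slice out none (some l)
      | none => out
    pvDedupLoop out' PySem.Set.empty []

-- the filter loop of _sanitize_evidence_families
def pvFilterLoop : List String → PySem.Set String → List String → List String
  | [], _, out => out
  | family :: rest, seen, out =>
    let normalized := PySem.Str.lower (PySem.Str.strip family)
    if !pvAllowed.contains normalized || seen.contains normalized then
      pvFilterLoop rest seen out
    else pvFilterLoop rest (seen.add normalized) (out ++ [normalized])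

def sanitize_evidence_families_py (v : List String) (limit : Option Int) : List String :=
  pvFilterLoop (pvAsStrList v limit) PySem.Set.empty []

-- ===== PORT B =====
-- B's single fused loop
def pvSingleLoop : List String → PySem.Set String → List String → List String
  | [], _, out => out
  | s :: rest, seen, out =>
    let n := PySem.Str.lower s
    if pvAllowed.contains n && !seen.contains n then
      pvSingleLoop rest (seen.add n) (out ++ [n])
    else pvSingleLoop rest seen out

def sanitize_evidence_families_py_alt (v : List String) (limit : Option Int) : List String :=
  if v = [] then []
  else
    let candidates := v.filterMap (fun x => let t := PySem.Str.strip x; if t = "" then none else some t)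
    let candidates' := match limit with
      | some l => PySem.List.slice candidates none (some l)
      | none => candidates
    pvSingleLoop candidates' PySem.Set.empty []

-- ===== PRECONDITION & SPEC =====
def Spec_sanitize_evidence_families_py (v : List String) (limit : Option Int) (out : List String) : Prop := out = sanitize_evidence_families_py_alt v limit
instance (v : List String) (limit : Option Int) (out : List String) : Decidable (Spec_sanitize_evidence_families_py v limit out) := by unfold Spec_sanitize_evidence_families_py; infer_instance

-- ===== CLAIM (what is proved, stated in full; the proofs are below) =====
def Claim_equal_sanitize_evidence_families_py : Prop := ∀ (v : List String) (limit : Option Int), Dom_sanitize_evidence_families_py v limit → Spec_sanitize_evidence_families_py v limit (sanitize_evidence_families_py v limit)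

-- ===== LEMMAS AND PROOFS =====

-- strip is idempotent
theorem pv_dropWhile_idem {α : Type} (p : α → Bool) (l : List α) :
    (l.dropWhile p).dropWhile p = l.dropWhile p := by
  induction l with
  | nil => rfl
  | cons a t ih =>
    by_cases h : p a = true
    · simpa [h] using ih
    · simp [h]

theorem pv_dropWhile_eq_self_of_prefix {α : Type} (p : α → Bool) {l t : List α}
    (h : t <+: l) (hl : l.dropWhile p = l) : t.dropWhile p = t := by
  cases t with
  | nil => rfl
  | cons a t' =>
    obtain ⟨r, hr⟩ := h
    subst hr
    by_cases hp : p a = true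
    · exfalso
      have h1 := hl
      simp [hp] at h1
      have hsuf : (t' ++ r).dropWhile p <:+ (t' ++ r) := List.dropWhile_suffix p
      have hlen := hsuf.length_le
      have hlen2 := congrArg List.length h1
      simp only [List.length_cons] at hlen2
      omega
    · simp [hp]

theorem pv_strip_idem_chars (s : List Char) :
    PySem.Chars.strip (PySem.Chars.strip s) = PySem.Chars.strip s := by
  unfold PySem.Chars.strip PySem.Chars.lstrip PySem.Chars.rstrip
  set p := PySem.Chars.isspace
  set l := s.dropWhile p with hl
  have hll : l.dropWhile p = l := pv_dropWhile_idem p s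
  have hpre : (l.reverse.dropWhile p).reverse <+: l := by
    have h := (List.dropWhile_suffix (l := l.reverse) p).reverse
    simpa using h
  have h1 : ((l.reverse.dropWhile p).reverse).dropWhile p = (l.reverse.dropWhile p).reverse :=
    pv_dropWhile_eq_self_of_prefix p hpre hll
  rw [h1]
  simp [pv_dropWhile_idem]

theorem pv_strip_idem (s : String) :
    PySem.Str.strip (PySem.Str.strip s) = PySem.Str.strip s := by
  unfold PySem.Str.strip
  simp [pv_strip_idem_chars]

-- accumulator-free forms of the three loops
def pvDedupP : List String → PySem.Set String → List String
  | [], _ => []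
  | x :: rest, seen =>
    let xl := PySem.Str.lower x
    if seen.contains xl then pvDedupP rest seen
    else x :: pvDedupP rest (seen.add xl)

def pvFilterP : List String → PySem.Set String → List String
  | [], _ => []
  | family :: rest, seen =>
    let n := PySem.Str.lower (PySem.Str.strip family)
    if !pvAllowed.contains n || seen.contains n then pvFilterP rest seen
    else n :: pvFilterP rest (seen.add n)

def pvSingleP : List String → PySem.Set String → List String
  | [], _ => []
  | s :: rest, seen =>
    let n := PySem.Str.lower s
    if pvAllowed.contains n && !seen.contains n then n :: pvSingleP rest (seen.add n)
    else pvSingleP rest seen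

theorem pvDedupLoop_eq (l : List String) : ∀ (seen : PySem.Set String) (acc : List String),
    pvDedupLoop l seen acc = acc ++ pvDedupP l seen := by
  induction l with
  | nil => intro seen acc; simp [pvDedupLoop, pvDedupP]
  | cons x rest ih =>
    intro seen acc
    simp only [pvDedupLoop, pvDedupP]
    split
    · exact ih _ _
    · rw [ih]; simp

theorem pvFilterLoop_eq (l : List String) : ∀ (seen : PySem.Set String) (acc : List String),
    pvFilterLoop l seen acc = acc ++ pvFilterP l seen := by
  induction l with
  | nil => intro seen acc; simp [pvFilterLoop, pvFilterP]
  | cons x rest ih =>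
    intro seen acc
    simp only [pvFilterLoop, pvFilterP]
    split
    · exact ih _ _
    · rw [ih]; simp

theorem pvSingleLoop_eq (l : List String) : ∀ (seen : PySem.Set String) (acc : List String),
    pvSingleLoop l seen acc = acc ++ pvSingleP l seen := by
  induction l with
  | nil => intro seen acc; simp [pvSingleLoop, pvSingleP]
  | cons x rest ih =>
    intro seen acc
    simp only [pvSingleLoop, pvSingleP]
    split
    · rw [ih]; simp
    · exact ih _ _

-- the key fusion lemma: filtering A's deduped list equals B's single fused pass
theorem pv_main : ∀ (l : List String) (sA sF sB : PySem.Set String),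
    (∀ x ∈ l, PySem.Str.strip x = x) →
    (∀ k : String, k ∈ sF → k ∈ sA) →
    (∀ k : String, k ∈ sB ↔ (k ∈ sA ∧ pvAllowed.contains k = true)) →
    pvFilterP (pvDedupP l sA) sF = pvSingleP l sB := by
  intro l
  induction l with
  | nil => intro sA sF sB _ _ _; simp [pvDedupP, pvFilterP, pvSingleP]
  | cons x rest ih =>
    intro sA sF sB hstrip hF hB
    have hx : PySem.Str.strip x = x := hstrip x List.mem_cons_self
    have hrest : ∀ y ∈ rest, PySem.Str.strip y = y := fun y hy => hstrip y (List.mem_cons_of_mem _ hy)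
    simp only [pvDedupP, pvSingleP]
    by_cases hA : PySem.Str.lower x ∈ sA
    · rw [if_pos ((PySem.Set.contains_iff _ _).mpr hA)]
      by_cases hAl : pvAllowed.contains (PySem.Str.lower x) = true
      · have hBmem : PySem.Str.lower x ∈ sB := (hB _).mpr ⟨hA, hAl⟩
        rw [hAl, (PySem.Set.contains_iff _ _).mpr hBmem]
        simp only [Bool.not_true, Bool.and_false, Bool.false_eq_true, reduceIte]
        exact ih sA sF sB hrest hF hB
      · rw [Bool.eq_false_iff.mpr hAl]
        simp only [Bool.false_and, Bool.false_eq_true, reduceIte]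
        exact ih sA sF sB hrest hF hB
    · rw [if_neg (fun h => hA ((PySem.Set.contains_iff _ _).mp h))]
      have hnB : PySem.Str.lower x ∉ sB := fun h => hA ((hB _).mp h).1
      have hnF : PySem.Str.lower x ∉ sF := fun h => hA (hF _ h)
      simp only [pvFilterP, hx]
      by_cases hAl : pvAllowed.contains (PySem.Str.lower x) = true
      · rw [hAl, (Bool.eq_false_iff.mpr (fun h => hnB ((PySem.Set.contains_iff _ _).mp h)) :
            sB.contains (PySem.Str.lower x) = false)]
        rw [(Bool.eq_false_iff.mpr (fun h => hnF ((PySem.Set.contains_iff _ _).mp h)) :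
            sF.contains (PySem.Str.lower x) = false)]
        simp only [Bool.not_true, Bool.false_or, Bool.not_false, Bool.and_true, Bool.false_eq_true, reduceIte]
        congr 1
        apply ih
        · exact hrest
        · intro k hk
          rcases (PySem.Set.mem_add _ _ _).mp hk with h | h
          · exact (PySem.Set.mem_add _ _ _).mpr (Or.inl (hF _ h))
          · exact (PySem.Set.mem_add _ _ _).mpr (Or.inr h)
        · intro k
          constructor
          · intro hk
            rcases (PySem.Set.mem_add _ _ _).mp hk with h | h
            · rcases (hB _).mp h with ⟨h1, h2⟩
              exact ⟨(PySem.Set.mem_add _ _ _).mpr (Or.inl h1), h2⟩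
            · exact ⟨(PySem.Set.mem_add _ _ _).mpr (Or.inr h), h ▸ hAl⟩
          · rintro ⟨h1, h2⟩
            rcases (PySem.Set.mem_add _ _ _).mp h1 with h | h
            · exact (PySem.Set.mem_add _ _ _).mpr (Or.inl ((hB _).mpr ⟨h, h2⟩))
            · exact (PySem.Set.mem_add _ _ _).mpr (Or.inr h)
      · rw [Bool.eq_false_iff.mpr hAl]
        simp only [Bool.not_false, Bool.true_or, Bool.false_and, Bool.false_eq_true, reduceIte]
        apply ih
        · exact hrest
        · intro k hk; exact (PySem.Set.mem_add _ _ _).mpr (Or.inl (hF _ hk))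
        · intro k
          constructor
          · intro hk
            rcases (hB _).mp hk with ⟨h1, h2⟩
            exact ⟨(PySem.Set.mem_add _ _ _).mpr (Or.inl h1), h2⟩
          · rintro ⟨h1, h2⟩
            rcases (PySem.Set.mem_add _ _ _).mp h1 with h | h
            · exact (hB _).mpr ⟨h, h2⟩
            · exact absurd (h ▸ h2) (by simpa using hAl)

-- every candidate is a strip image, hence fixed by strip
theorem pv_filterMap_stripped (v : List String) :
    ∀ x ∈ v.filterMap (fun x => let t := PySem.Str.strip x; if t = "" then none else some t),
      PySem.Str.strip x = x := by
  intro x hx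
  rcases List.mem_filterMap.mp hx with ⟨a, _, ha⟩
  simp only at ha
  split at ha
  · exact absurd ha (by simp)
  · have h2 : PySem.Str.strip a = x := by injection ha
    rw [← h2, pv_strip_idem]

-- ===== VERDICT (by name: the statement is the Claim_ definition above) =====
theorem sanitize_evidence_families_py_spec : Claim_equal_sanitize_evidence_families_py := by
  intro v limit _
  unfold Spec_sanitize_evidence_families_py
  unfold sanitize_evidence_families_py sanitize_evidence_families_py_alt pvAsStrList
  by_cases hv : v = []
  · simp [hv, pvFilterLoop]
  · simp only [hv, if_false]
    rw [pvDedupLoop_eq, pvFilterLoop_eq, pvSingleLoop_eq]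
    simp only [List.nil_append]
    apply pv_main
    · intro x hx
      cases limit with
      | none => exact pv_filterMap_stripped v x hx
      | some l => exact pv_filterMap_stripped v x (PySem.List.mem_of_mem_slice _ none (some l) hx)
    · intro k hk; exact absurd hk (by simp [PySem.Set.empty])
    · intro k; simp [PySem.Set.empty]
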